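-- pv_equiv track=rewrite | github.com/bpgschmidt/DD1318-ProgTek | lab2/my_module.py | bandit_language
-- ===== SOURCE A (Python) =====
-- def bandit_language(string):
--     consonants = ["q", "w", "r", "t", "p", "s", "d", "f", "g", "h", "j", "k", "l", "z", "x", "c", "v", "b", "n", "m"]
--     translation = ""
--     for i in range(len(string)):
--         if string[i] in consonants:
--             translation += string[i] + "o" + string[i]
--         else:
--             translation += string[i]
--     return translation
-- ===== SOURCE B (Python) =====
-- def bandit_language(string):
--     for c in "qwrtpsdfghjklzxcvbnm":
--         string = string.replace(c, c + "o" + c)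
--     return string
-- ===== Notes on version B (the rewrite author's own statement) =====
-- stated objective: faster
-- what changed: Instead of one Python-level per-character pass with an if/else and repeated string concatenation, B performs 20 staged whole-string str.replace passes, one per consonant, each running in C; the passes do not interact because the consonants are distinct and the inserted separator vowel is not a consonant.
import Mathlib
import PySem

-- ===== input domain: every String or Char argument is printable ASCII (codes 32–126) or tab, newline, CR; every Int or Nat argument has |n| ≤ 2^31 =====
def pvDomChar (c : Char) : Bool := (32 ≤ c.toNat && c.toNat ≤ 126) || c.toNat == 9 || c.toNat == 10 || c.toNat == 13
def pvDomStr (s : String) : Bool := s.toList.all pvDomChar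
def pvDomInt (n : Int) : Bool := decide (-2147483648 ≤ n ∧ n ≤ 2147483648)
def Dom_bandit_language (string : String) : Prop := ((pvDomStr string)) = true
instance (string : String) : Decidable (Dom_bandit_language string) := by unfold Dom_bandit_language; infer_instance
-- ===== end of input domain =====

-- B replaces A's single per-character loop (if/else + concatenation) by 20 staged
-- whole-string replace passes, one per consonant; the passes do not interact because
-- the consonants are distinct and the inserted 'o' is not a consonant.

-- ===== PORT A =====
-- A's local list of single-character consonant strings; ported as Chars (string[i] is a Char here).
def banditConsonants : List Char :=
  ['q','w','r','t','p','s','d','f','g','h','j','k','l','z','x','c','v','b','n','m']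

def bandit_language (string : String) : String :=
  String.ofList ((PySem.List.pyRange 0 (string.toList.length : Int) 1).foldl
    (fun acc i =>
      -- i is always in range, so pyGetD's default is never used
      if banditConsonants.contains (PySem.List.pyGetD string.toList i ' ') then
        acc ++ [PySem.List.pyGetD string.toList i ' ', 'o', PySem.List.pyGetD string.toList i ' ']
      else acc ++ [PySem.List.pyGetD string.toList i ' ']) [])

-- ===== PORT B =====
-- port of Source B: a foldl over the consonant string, each step one full str.replace pass.
def bandit_language_alt (string : String) : String :=
  String.ofList ("qwrtpsdfghjklzxcvbnm".toList.foldl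
    (fun s c => PySem.Chars.replace s [c] [c, 'o', c]) string.toList)

-- ===== PRECONDITION & SPEC =====
def Spec_bandit_language (string : String) (out : String) : Prop := out = bandit_language_alt string
instance (string : String) (out : String) : Decidable (Spec_bandit_language string out) := by unfold Spec_bandit_language; infer_instance

-- ===== CLAIM =====
def Claim_equal_bandit_language : Prop := ∀ (string : String), Dom_bandit_language string → Spec_bandit_language string (bandit_language string)

-- ===== LEMMAS AND PROOFS =====

-- what one full replace pass for the single-character pattern [c] does, per character
def banditRep (c : Char) (new : List Char) (ch : Char) : List Char :=
  if ch = c then new else [ch]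

lemma replace_go_singleton (c : Char) (new : List Char) :
    ∀ (fuel : Nat) (l acc : List Char), l.length ≤ fuel →
      PySem.Chars.replace.go [c] new fuel l acc
        = acc.reverse ++ l.flatMap (banditRep c new) := by
  intro fuel
  induction fuel with
  | zero =>
    intro l acc h
    have : l = [] := List.eq_nil_of_length_eq_zero (Nat.le_zero.mp h)
    subst this
    simp [PySem.Chars.replace.go]
  | succ n ih =>
    intro l acc h
    cases l with
    | nil => simp [PySem.Chars.replace.go]
    | cons ch t =>
      by_cases hc : ch = c
      · subst hc
        have hpre : List.isPrefixOf [ch] (ch :: t) = true := by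
          simp [List.isPrefixOf]
        rw [PySem.Chars.replace.go]
        simp only [hpre, if_true, List.length_cons, List.drop_succ_cons,
          List.length_nil, List.drop_zero]
        rw [ih t _ (Nat.le_of_succ_le_succ h)]
        simp [banditRep]
      · have hpre : List.isPrefixOf [c] (ch :: t) = false := by
          simp [List.isPrefixOf]
          exact fun hcc => absurd hcc.symm hc
        rw [PySem.Chars.replace.go]
        simp only [hpre]
        rw [if_neg (by simp), ih t _ (Nat.le_of_succ_le_succ h)]
        simp [banditRep, hc]

lemma replace_singleton (c : Char) (new : List Char) (s : List Char) :
    PySem.Chars.replace s [c] new = s.flatMap (banditRep c new) := by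
  rw [PySem.Chars.replace]
  simp only [List.isEmpty_cons]
  exact replace_go_singleton c new s.length s [] (le_refl _)

-- per-character effect of the whole staged pipeline over a consonant list cs
def banditExpand (cs : List Char) (ch : Char) : List Char :=
  if ch ∈ cs then [ch, 'o', ch] else [ch]

lemma staged_foldl (cs : List Char) (hnd : cs.Nodup) (ho : 'o' ∉ cs) (s : List Char) :
    cs.foldl (fun s c => PySem.Chars.replace s [c] [c, 'o', c]) s
      = s.flatMap (banditExpand cs) := by
  induction cs using List.reverseRecOn generalizing s with
  | nil =>
    simp only [List.foldl_nil]
    have : banditExpand [] = fun ch => [ch] := by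
      funext ch; simp [banditExpand]
    rw [this, List.flatMap_singleton']
  | append_singleton cs c ih =>
    have hnd' : cs.Nodup := (List.nodup_append.mp hnd).1
    have hcn : c ∉ cs := by
      rw [List.nodup_append] at hnd
      exact fun hm => (hnd.2.2 c hm c (List.mem_singleton_self c)) rfl
    have ho' : 'o' ∉ cs := fun hm => ho (List.mem_append_left _ hm)
    have hoc : c ≠ 'o' := by
      intro hco; exact ho (hco ▸ List.mem_append_right _ (List.mem_singleton_self c))
    rw [List.foldl_append, List.foldl_cons, List.foldl_nil, ih hnd' ho',
        replace_singleton, List.flatMap_assoc]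
    apply List.flatMap_congr
    intro ch _
    by_cases hm : ch ∈ cs
    · have hcc : ch ≠ c := fun hq => hcn (hq ▸ hm)
      simp [banditExpand, banditRep, hm, hcc, Ne.symm hoc, List.mem_append]
    · by_cases hc : ch = c
      · subst hc
        simp [banditExpand, banditRep, hm]
      · simp [banditExpand, banditRep, hm, hc]

-- ===== VERDICT =====
theorem bandit_language_spec : Claim_equal_bandit_language := by
  intro s _
  unfold Spec_bandit_language bandit_language bandit_language_alt
  rw [PySem.List.foldl_pyRange_zero_pyGetD' s.toList ' '
      (fun acc c => if banditConsonants.contains c then acc ++ [c, 'o', c] else acc ++ [c]) []]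
  rw [staged_foldl _ (by decide) (by decide)]
  have hstep : (fun (acc : List Char) (c : Char) =>
      if banditConsonants.contains c then acc ++ [c, 'o', c] else acc ++ [c])
      = fun acc c => acc ++ (if banditConsonants.contains c then [c, 'o', c] else [c]) := by
    funext acc c; split <;> rfl
  rw [hstep, PySem.List.foldl_append_eq_flatMap]
  simp only [List.nil_append]
  congr 1
  apply List.flatMap_congr
  intro c _
  have : ("qwrtpsdfghjklzxcvbnm".toList) = banditConsonants := by decide
  rw [this]
  by_cases hc : c ∈ banditConsonants <;> simp [banditExpand, hc]
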